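-- pv_equiv track=rewrite | github.com/harmannd/Codewars | UpsideDown/upside_down.py | looper
-- ===== SOURCE A (Python) =====
-- def looper(digits):
--     for x in range(0, int(len(digits) / 2)):
--         #if not opposites, fail out
--         if opposites(digits[x], digits[len(digits) - 1 - x]) == False:
--             return False
--     #if odd and middle digit isn't a 018 fail out
--     if len(digits) % 2 != 0:
--         middle = digits[int(len(digits) / 2)]
--         if middle != '0' and middle != '1' and middle != '8':
--             return False
--     #digits are flippable
--     return True
--
-- def opposites(x, y):
--     if x == y == '0':
--         return True
--     if x == y == '1':
--         return True
--     if x == y == '8':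
--         return True
--     if x == '6' and y == '9' or x == '9' and y == '6':
--         return True
--     return False
-- ===== SOURCE B (Python) =====
-- def looper(digits):
--     R = {'0': '0', '1': '1', '8': '8', '6': '9', '9': '6'}
--     if any(c not in R for c in digits):
--         return False
--     return ''.join(R[c] for c in reversed(digits)) == digits
-- ===== Notes on version B (the rewrite author's own statement) =====
-- stated objective: simpler
-- what changed: Replaces the half-length index-pair loop with its unreachable-index arithmetic and the separate odd-middle special case by a whole-string rotation: map every digit through a rotation dict, reverse, and compare with the original.
import Mathlib
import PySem

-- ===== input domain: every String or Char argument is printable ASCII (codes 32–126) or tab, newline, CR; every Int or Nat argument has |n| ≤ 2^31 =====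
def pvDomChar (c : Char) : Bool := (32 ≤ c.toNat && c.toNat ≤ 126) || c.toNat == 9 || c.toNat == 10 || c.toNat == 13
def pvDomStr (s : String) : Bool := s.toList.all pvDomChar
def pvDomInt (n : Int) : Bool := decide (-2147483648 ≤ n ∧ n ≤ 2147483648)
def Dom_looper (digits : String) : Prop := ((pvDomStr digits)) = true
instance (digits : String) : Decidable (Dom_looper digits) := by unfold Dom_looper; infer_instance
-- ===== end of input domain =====

-- B replaces A's half-length index-pair loop (with its odd-middle special case) by a
-- whole-string rotate-reverse-compare; objective: simpler (same O(n) cost; return value only).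

-- ===== PORT A =====
def opposites (x y : Char) : Bool :=
  if x == y && y == '0' then true
  else if x == y && y == '1' then true
  else if x == y && y == '8' then true
  else if (x == '6' && y == '9') || (x == '9' && y == '6') then true
  else false

-- A's for-loop; `none` = loop finished without returning, `some b` = early `return b`.
-- digits[x] and digits[len-1-x] are always in range (0 ≤ x < len/2), so the none branch
-- of pyGet? (Python IndexError) is unreachable.
def looperLoop (l : List Char) (n : Int) : List Int → Option Bool
  | [] => none
  | x :: xs =>
    match PySem.List.pyGet? l x, PySem.List.pyGet? l (n - 1 - x) with
    | some a, some b => if opposites a b == false then some false else looperLoop l n xs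
    | _, _ => some false

def looper (digits : String) : Bool :=
  let l := digits.toList
  let n : Int := l.length
  -- int(len(digits) / 2) = n // 2 exactly, since n ≥ 0
  let half : Int := PySem.Int.floordiv n 2
  match looperLoop l n (PySem.List.pyRange 0 half 1) with
  | some r => r
  | none =>
    if PySem.Int.mod n 2 != 0 then
      match PySem.List.pyGet? l half with
      | some m => if m != '0' && m != '1' && m != '8' then false else true
      | none => false  -- unreachable: half < len when len is odd
    else true

-- ===== PORT B =====
def rotR : PySem.Dict Char Char :=
  PySem.Dict.ofList [('0', '0'), ('1', '1'), ('8', '8'), ('6', '9'), ('9', '6')]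

def looper_alt (digits : String) : Bool :=
  let l := digits.toList
  if l.any (fun c => !(rotR.contains c)) then false
  else String.ofList (l.reverse.map (fun c => (rotR.get? c).getD ' ')) == digits

-- ===== PRECONDITION & SPEC =====
def Spec_looper (digits : String) (out : Bool) : Prop := out = looper_alt digits
instance (digits : String) (out : Bool) : Decidable (Spec_looper digits out) := by unfold Spec_looper; infer_instance

-- ===== CLAIM (what is proved, stated in full; the proofs are below) =====
def Claim_equal_looper : Prop := ∀ (digits : String), Dom_looper digits → Spec_looper digits (looper digits)

-- ===== LEMMAS AND PROOFS =====

-- the common characterisation both ports are reduced to: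
-- reading position len-1-i through the rotation map gives position i, for every i
def Qrot (l : List Char) : Prop :=
  ∀ i, i < l.length → rotR.get? l[l.length - 1 - i]! = some l[i]!

theorem rotR_eq : rotR = PySem.Dict.mk [('0', '0'), ('1', '1'), ('8', '8'), ('6', '9'), ('9', '6')] := by decide
theorem rot_get (c : Char) : rotR.get? c =
    (if c = '0' then some '0' else if c = '1' then some '1' else if c = '8' then some '8'
     else if c = '6' then some '9' else if c = '9' then some '6' else none) := by
  rw [rotR_eq]
  simp only [PySem.Dict.get?_mk_cons, beq_iff_eq]
  split_ifs <;> subst_vars <;> first | rfl | simp_all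
theorem opp_iff (a b : Char) : opposites a b = true ↔ rotR.get? a = some b := by
  simp only [opposites, rot_get, Bool.and_eq_true, beq_iff_eq, Bool.or_eq_true]
  split_ifs <;>
    (try rcases ‹_ ∨ _› with ⟨rfl, rfl⟩ | ⟨rfl, rfl⟩) <;>
    (try obtain ⟨rfl, rfl⟩ := ‹_ ∧ _›) <;>
    simp_all <;>
    (intro h; subst h; simp_all)
theorem rot_symm (a b : Char) : rotR.get? a = some b → rotR.get? b = some a := by
  simp only [rot_get]
  split_ifs <;> simp_all <;> (intro h; subst h; simp_all)
theorem mid_iff (a : Char) :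
    rotR.get? a = some a ↔ ¬(a ≠ '0' ∧ a ≠ '1' ∧ a ≠ '8') := by
  simp only [rot_get]
  split_ifs <;> simp_all
theorem loop_none_iff (l : List Char) (n : Int) (r : List Int) :
    looperLoop l n r = none ↔
      ∀ x ∈ r, ∃ c d, PySem.List.pyGet? l x = some c ∧
        PySem.List.pyGet? l (n - 1 - x) = some d ∧ opposites c d = true := by
  induction r with
  | nil => simp [looperLoop]
  | cons x xs ih =>
    cases h1 : PySem.List.pyGet? l x <;> cases h2 : PySem.List.pyGet? l (n - 1 - x) <;>
      simp only [looperLoop, h1, h2]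
    · apply iff_of_false (by simp)
      intro h
      obtain ⟨c, d, hc, -, -⟩ := h x (List.mem_cons_self)
      rw [h1] at hc; cases hc
    · apply iff_of_false (by simp)
      intro h
      obtain ⟨c, d, hc, -, -⟩ := h x (List.mem_cons_self)
      rw [h1] at hc; cases hc
    · apply iff_of_false (by simp)
      intro h
      obtain ⟨c, d, -, hd, -⟩ := h x (List.mem_cons_self)
      rw [h2] at hd; cases hd
    · rename_i c d
      by_cases ho : opposites c d = true
      · rw [show (if (opposites c d == false) = true then some false
              else looperLoop l n xs) = looperLoop l n xs by simp [ho], ih]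
        constructor
        · intro h y hy
          rcases List.mem_cons.mp hy with rfl | hy
          · exact ⟨c, d, h1, h2, ho⟩
          · exact h y hy
        · intro h y hy
          exact h y (List.mem_cons_of_mem _ hy)
      · simp only [Bool.not_eq_true] at ho
        rw [show (if (opposites c d == false) = true then some false
              else looperLoop l n xs) = some false by simp [ho]]
        apply iff_of_false (by simp)
        intro h
        obtain ⟨c', d', hc, hd, hodd⟩ := h x (List.mem_cons_self)
        rw [h1] at hc; cases hc
        rw [h2] at hd; cases hd
        rw [ho] at hodd; cases hodd

theorem loop_vals (l : List Char) (n : Int) (r : List Int) :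
    looperLoop l n r = none ∨ looperLoop l n r = some false := by
  induction r with
  | nil => left; rfl
  | cons x xs ih =>
    cases h1 : PySem.List.pyGet? l x <;> cases h2 : PySem.List.pyGet? l (n - 1 - x) <;>
      simp only [looperLoop, h1, h2]
    · trivial
    · trivial
    · trivial
    · split
      · right; rfl
      · exact ih

theorem key_loop (l : List Char) :
    looperLoop l (l.length : Int) (PySem.List.pyRange 0 ((l.length / 2 : Nat) : Int) 1) = none ↔
      ∀ i, i < l.length / 2 → opposites l[i]! l[l.length - 1 - i]! = true := by
  rw [loop_none_iff]
  constructor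
  · intro h i hi
    obtain ⟨c, d, hc, hd, ho⟩ := h (i : Int)
      (PySem.List.mem_pyRange_one.mpr ⟨by positivity, by exact_mod_cast hi⟩)
    have hi' : i < l.length := by omega
    have hcast : ((l.length : Int) - 1 - (i : Int)) = ((l.length - 1 - i : Nat) : Int) := by
      omega
    rw [PySem.List.pyGet?_natCast, List.getElem?_eq_getElem hi'] at hc
    rw [hcast, PySem.List.pyGet?_natCast,
      List.getElem?_eq_getElem (by omega : l.length - 1 - i < l.length)] at hd
    cases hc; cases hd
    rwa [getElem!_pos l i hi', getElem!_pos l _ (by omega)]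
  · intro h x hx
    obtain ⟨hx0, hx1⟩ := PySem.List.mem_pyRange_one.mp hx
    lift x to ℕ using hx0 with i
    have hi : i < l.length / 2 := by exact_mod_cast hx1
    have hi' : i < l.length := by omega
    have hcast : ((l.length : Int) - 1 - (i : Int)) = ((l.length - 1 - i : Nat) : Int) := by
      omega
    refine ⟨l[i]!, l[l.length - 1 - i]!, ?_, ?_, h i hi⟩
    · rw [PySem.List.pyGet?_natCast, List.getElem?_eq_getElem hi', getElem!_pos l i hi']
    · rw [hcast, PySem.List.pyGet?_natCast,
        List.getElem?_eq_getElem (by omega : l.length - 1 - i < l.length),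
        getElem!_pos l _ (by omega : l.length - 1 - i < l.length)]

theorem A_iff (d : String) : looper d = true ↔
    ((∀ i, i < d.toList.length / 2 →
        opposites d.toList[i]! d.toList[d.toList.length - 1 - i]! = true) ∧
      (d.toList.length % 2 = 1 →
        ¬(d.toList[d.toList.length / 2]! ≠ '0' ∧ d.toList[d.toList.length / 2]! ≠ '1' ∧
          d.toList[d.toList.length / 2]! ≠ '8'))) := by
  unfold looper
  dsimp only
  rw [show PySem.Int.floordiv ((d.toList.length : Int)) 2 = ((d.toList.length / 2 : Nat) : Int) by
        exact_mod_cast PySem.Int.floordiv_natCast d.toList.length 2,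
      show PySem.Int.mod ((d.toList.length : Int)) 2 = ((d.toList.length % 2 : Nat) : Int) by
        exact_mod_cast PySem.Int.mod_natCast d.toList.length 2]
  rcases loop_vals d.toList (d.toList.length : Int)
      (PySem.List.pyRange 0 ((d.toList.length / 2 : Nat) : Int) 1) with hl | hl <;>
    rw [hl]
  · have hpair := (key_loop d.toList).mp hl
    by_cases hodd : d.toList.length % 2 = 1
    · have hm : d.toList.length / 2 < d.toList.length := by omega
      dsimp only
      rw [if_pos (by rw [hodd]; norm_num)]
      rw [PySem.List.pyGet?_natCast, List.getElem?_eq_getElem hm]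
      dsimp only
      rw [← getElem!_pos d.toList _ hm]
      constructor
      · intro h
        refine ⟨hpair, fun _ hcon => ?_⟩
        obtain ⟨h0, h1, h8⟩ := hcon
        rw [if_pos (by simp only [Bool.and_eq_true, bne_iff_ne, ne_eq]; exact ⟨⟨h0, h1⟩, h8⟩)] at h
        cases h
      · rintro ⟨-, hmid⟩
        rw [if_neg]
        intro hcon
        simp only [Bool.and_eq_true, bne_iff_ne] at hcon
        exact hmid hodd ⟨hcon.1.1, hcon.1.2, hcon.2⟩
    · dsimp only
      rw [if_neg (by
        simp only [bne_iff_ne, ne_eq, not_not]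
        exact_mod_cast (by omega : d.toList.length % 2 = 0))]
      simp only [true_iff]
      exact ⟨hpair, fun h => absurd h hodd⟩
  · apply iff_of_false (by simp)
    rintro ⟨hpair, -⟩
    rw [(key_loop d.toList).mpr hpair] at hl
    cases hl
theorem ofList_eq_iff (xs : List Char) (d : String) : (String.ofList xs = d) ↔ xs = d.toList := by
  constructor
  · intro h; rw [← h]; simp
  · intro h; subst h; simp

theorem B_iff (d : String) : looper_alt d = true ↔ Qrot d.toList := by
  unfold looper_alt
  dsimp only
  by_cases hany : d.toList.any (fun c => !(rotR.contains c)) = true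
  · rw [if_pos hany]
    apply iff_of_false (by simp)
    simp only [List.any_eq_true, Bool.not_eq_eq_eq_not, Bool.not_true] at hany
    obtain ⟨c, hc, hcont⟩ := hany
    obtain ⟨j, hj, rfl⟩ := List.mem_iff_getElem.mp hc
    intro hQ
    have hi : d.toList.length - 1 - j < d.toList.length := by omega
    have h1 : d.toList.length - 1 - (d.toList.length - 1 - j) = j := by omega
    have := hQ (d.toList.length - 1 - j) hi
    rw [h1, getElem!_pos d.toList j hj] at this
    rw [PySem.Dict.contains_eq_isSome_get?, this] at hcont
    cases hcont
  · rw [if_neg hany]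
    replace hany : ∀ c ∈ d.toList, rotR.contains c = true := by
      intro c hc
      by_contra hcc
      rw [Bool.not_eq_true] at hcc
      exact hany (List.any_eq_true.mpr ⟨c, hc, by rw [hcc]; rfl⟩)
    rw [beq_iff_eq, ofList_eq_iff]
    constructor
    · intro h i hi
      have hlen : (d.toList.reverse.map fun c => (rotR.get? c).getD ' ').length = d.toList.length := by
        simp
      have hge := congrArg (fun xs => xs[i]?) h
      simp only [List.getElem?_map] at hge
      rw [List.getElem?_reverse (by omega), List.getElem?_eq_getElem (by omega : d.toList.length - 1 - i < d.toList.length),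
        List.getElem?_eq_getElem hi] at hge
      simp only [Option.map_some] at hge
      have hmem : d.toList[d.toList.length - 1 - i] ∈ d.toList := List.getElem_mem _
      have hcont := hany _ hmem
      rw [PySem.Dict.contains_eq_isSome_get?] at hcont
      obtain ⟨v, hv⟩ := Option.isSome_iff_exists.mp hcont
      rw [getElem!_pos d.toList _ (by omega : d.toList.length - 1 - i < d.toList.length),
        getElem!_pos d.toList i hi, hv]
      rw [hv] at hge
      simp only [Option.getD_some, Option.some.injEq] at hge ⊢
      exact hge
    · intro hQ
      apply List.ext_getElem (by simp)
      intro i h1i h2i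
      have hi : i < d.toList.length := h2i
      have hrev : d.toList.length - 1 - i < d.toList.length := by omega
      rw [List.getElem_map, List.getElem_reverse]
      have := hQ i hi
      rw [getElem!_pos d.toList _ (by omega : d.toList.length - 1 - i < d.toList.length),
        getElem!_pos d.toList i hi] at this
      rw [this]
      rfl

theorem bridge (l : List Char) :
    ((∀ i, i < l.length / 2 → opposites l[i]! l[l.length - 1 - i]! = true) ∧
      (l.length % 2 = 1 →
        ¬(l[l.length / 2]! ≠ '0' ∧ l[l.length / 2]! ≠ '1' ∧ l[l.length / 2]! ≠ '8'))) ↔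
      Qrot l := by
  constructor
  · rintro ⟨hp, hm⟩ i hi
    rcases Nat.lt_or_ge i (l.length / 2) with h | h
    · exact rot_symm _ _ ((opp_iff _ _).mp (hp i h))
    · rcases Nat.lt_or_ge (l.length - 1 - i) (l.length / 2) with h' | h'
      · have := (opp_iff _ _).mp (hp _ h')
        rwa [show l.length - 1 - (l.length - 1 - i) = i by omega] at this
      · have hmid : l.length % 2 = 1 ∧ i = l.length / 2 := by omega
        obtain ⟨ho, rfl⟩ := hmid
        rw [show l.length - 1 - l.length / 2 = l.length / 2 by omega]
        exact (mid_iff _).mpr (hm ho)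
  · intro hQ
    constructor
    · intro i hi
      have hQi := hQ i (by omega)
      exact (opp_iff _ _).mpr (rot_symm _ _ hQi)
    · intro ho
      have hQi := hQ (l.length / 2) (by omega)
      rw [show l.length - 1 - l.length / 2 = l.length / 2 by omega] at hQi
      exact (mid_iff _).mp hQi

theorem main (d : String) : looper d = looper_alt d := by
  have hA := A_iff d
  have hB := B_iff d
  have hAB := (hA.trans (bridge d.toList)).trans hB.symm
  cases h1 : looper d <;> cases h2 : looper_alt d <;> simp_all

-- ===== VERDICT (by name: the statement is the Claim_ definition above) =====
theorem looper_spec : Claim_equal_looper := by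
  intro digits _
  unfold Spec_looper
  exact main digits
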